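-- pv_equiv track=rewrite | github.com/bxshi/topic_flow | lstm_sentence_operator.py | sentence_by_topics
-- ===== SOURCE A (Python) =====
-- def sentence_by_topics(sent_ids, topics):
--     topic_sent_map = dict()
--     for sent_id in sent_ids:
--         topic = int(topics[sent_id])
--         if topic not in topic_sent_map:
--             topic_sent_map[topic] = list()
--         topic_sent_map[topic].append(sent_id)
--     return topic_sent_map
-- ===== SOURCE B (Python) =====
-- def sentence_by_topics(sent_ids, topics):
--     # Distinct topics in first-occurrence order, then one filtering pass per topic.
--     keys = list(dict.fromkeys(int(topics[s]) for s in sent_ids))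
--     return {t: [s for s in sent_ids if int(topics[s]) == t] for t in keys}
-- ===== Notes on version B (the rewrite author's own statement) =====
-- stated objective: alternative
-- what changed: Replaces the incremental dict-bucketing loop by computing the distinct topics once (dict.fromkeys dedup) and building each group with a filtering comprehension over sent_ids.
import Mathlib
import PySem

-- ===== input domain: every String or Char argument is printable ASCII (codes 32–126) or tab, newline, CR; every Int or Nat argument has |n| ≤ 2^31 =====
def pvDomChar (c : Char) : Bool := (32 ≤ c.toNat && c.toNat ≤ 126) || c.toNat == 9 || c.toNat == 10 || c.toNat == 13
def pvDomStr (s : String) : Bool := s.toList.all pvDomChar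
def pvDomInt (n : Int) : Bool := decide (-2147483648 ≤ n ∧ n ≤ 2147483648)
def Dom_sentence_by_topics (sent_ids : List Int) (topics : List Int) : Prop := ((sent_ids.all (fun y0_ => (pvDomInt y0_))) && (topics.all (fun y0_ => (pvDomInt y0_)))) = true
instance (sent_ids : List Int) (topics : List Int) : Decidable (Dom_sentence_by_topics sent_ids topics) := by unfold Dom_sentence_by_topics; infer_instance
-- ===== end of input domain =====

-- B groups by computing the distinct topics once (ordered dedup) and filtering sent_ids per topic,
-- instead of A's incremental dict-bucketing loop; same return value (alternative decomposition).

-- ===== PORT A =====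
def sentence_by_topics (sent_ids : List Int) (topics : List Int) : List (Int × List Int) :=
  (sent_ids.foldl (fun d sid =>
      match PySem.List.pyGet? topics sid with
      | none => d   -- Python raises IndexError here; excluded by Pre_
      | some topic =>
        let d' := if d.contains topic then d else d.insert topic ([] : List Int)
        d'.modify topic [] (fun l => l ++ [sid]))
    PySem.Dict.empty).items

-- ===== PORT B =====
def sentence_by_topics_alt (sent_ids : List Int) (topics : List Int) : List (Int × List Int) :=
  -- pyGetD is exact on Pre_ (every sent_id a valid index); dedup = dict.fromkeys
  (PySem.List.dedup (sent_ids.map (fun s => PySem.List.pyGetD topics s 0))).map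
    (fun t => (t, sent_ids.filter (fun s => PySem.List.pyGetD topics s 0 == t)))

-- ===== PRECONDITION & SPEC =====
-- Pre_ excludes exactly the inputs where topics[sent_id] raises IndexError in A.
def Pre_sentence_by_topics (sent_ids : List Int) (topics : List Int) : Prop :=
  ∀ s ∈ sent_ids, PySem.Raise.InRange topics.length s
instance (sent_ids : List Int) (topics : List Int) : Decidable (Pre_sentence_by_topics sent_ids topics) := by unfold Pre_sentence_by_topics; infer_instance
def pvWitness_sentence_by_topics : List Int × List Int := ([0, 1, -1, 0], [5, 7, 5])

def Spec_sentence_by_topics (sent_ids : List Int) (topics : List Int) (out : List (Int × List Int)) : Prop := out = sentence_by_topics_alt sent_ids topics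
instance (sent_ids : List Int) (topics : List Int) (out : List (Int × List Int)) : Decidable (Spec_sentence_by_topics sent_ids topics out) := by unfold Spec_sentence_by_topics; infer_instance

-- ===== CLAIM (what is proved, stated in full; the proofs are below) =====
def Claim_equal_sentence_by_topics : Prop := ∀ (sent_ids : List Int) (topics : List Int), Dom_sentence_by_topics sent_ids topics → Pre_sentence_by_topics sent_ids topics → Spec_sentence_by_topics sent_ids topics (sentence_by_topics sent_ids topics)

-- ===== LEMMAS AND PROOFS =====

-- A's loop body collapses to a single Dict.modify when the index is in range.
theorem stepA_eq_modify (topics : List Int) (d : PySem.Dict Int (List Int)) (sid : Int)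
    (h : PySem.Raise.InRange topics.length sid) :
    (match PySem.List.pyGet? topics sid with
      | none => d
      | some topic =>
        let d' := if d.contains topic then d else d.insert topic ([] : List Int)
        d'.modify topic [] (fun l => l ++ [sid]))
    = d.modify (PySem.List.pyGetD topics sid 0) [] (fun l => l ++ [sid]) := by
  have hs : PySem.List.pyGet? topics sid = some (PySem.List.pyGetD topics sid 0) := by
    rcases hg : PySem.List.pyGet? topics sid with _ | t
    · exact absurd ((PySem.List.pyGet?_eq_none_iff topics sid).mp hg) (by exact fun hn => hn h)
    · simp [PySem.List.pyGetD, hg]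
  rw [hs]
  set t := PySem.List.pyGetD topics sid 0 with ht
  by_cases hc : d.contains t
  · simp [hc]
  · simp only [hc, Bool.false_eq_true, ite_false]
    rw [PySem.Dict.modify, PySem.Dict.modify, PySem.Dict.getD_insert_self,
      PySem.Dict.insert_insert_self, PySem.Dict.getD_of_not_contains d [] (by simpa using hc)]

theorem filter_map_pairs (sent_ids : List Int) (key : Int → Int) (t : Int) :
    ((sent_ids.map (fun s => (key s, s))).filter (fun p => p.1 == t)).map (fun p => p.2)
      = sent_ids.filter (fun s => key s == t) := by
  induction sent_ids with
  | nil => rfl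
  | cons a l ih =>
    by_cases h : key a == t <;> simp [h, ih]

-- ===== VERDICT (by name: the statement is the Claim_ definition above) =====
theorem sentence_by_topics_spec : Claim_equal_sentence_by_topics := by
  intro sent_ids topics _ hpre
  unfold Spec_sentence_by_topics sentence_by_topics sentence_by_topics_alt
  set key : Int → Int := fun s => PySem.List.pyGetD topics s 0 with hkey
  have h1 : sent_ids.foldl (fun d sid =>
      (match PySem.List.pyGet? topics sid with
        | none => d
        | some topic =>
          let d' := if d.contains topic then d else d.insert topic ([] : List Int)
          d'.modify topic [] (fun l => l ++ [sid])))
      PySem.Dict.empty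
      = sent_ids.foldl (fun d sid => d.modify (key sid) [] (fun l => l ++ [sid])) PySem.Dict.empty :=
    PySem.List.foldl_congr_mem _ _ _ _ (fun d s hs => stepA_eq_modify topics d s (hpre s hs))
  rw [h1]
  set D := sent_ids.foldl (fun d sid => d.modify (key sid) [] (fun l => l ++ [sid])) PySem.Dict.empty with hD
  have hnodup : D.keys.Nodup := by
    apply PySem.Dict.nodup_keys_foldl_modify_key sent_ids key ([] : List Int)
      (fun _ s l => l ++ [s])
    simp [PySem.Dict.keys_empty]
  have hkeys : D.keys = PySem.List.dedup (sent_ids.map key) := by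
    rw [hD, PySem.Dict.keys_foldl_modify_key sent_ids key ([] : List Int) (fun _ s l => l ++ [s])]
    simp [PySem.Dict.keys_empty, PySem.List.dedup_eq_ofList, PySem.Set.update, PySem.Set.ofList,
      PySem.Set.empty]
  have hgetD : ∀ t, D.getD t [] = sent_ids.filter (fun s => key s == t) := by
    intro t
    have hm : D = (sent_ids.map (fun s => (key s, s))).foldl
        (fun d p => d.modify p.1 [] (fun l => l ++ [p.2])) PySem.Dict.empty := by
      rw [hD, List.foldl_map]
    rw [hm, PySem.Dict.getD_foldl_modify_append, PySem.Dict.getD_empty, List.nil_append,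
      filter_map_pairs]
  rw [PySem.Dict.items_eq_map_keys D hnodup ([] : List Int), hkeys]
  exact List.map_congr_left (fun t _ => by rw [hgetD t])
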